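-- pv_equiv track=rewrite | github.com/AuraMindNest/weblate | weblate/utils/quickbook.py | _clean_cell_text
-- ===== SOURCE A (Python) =====
-- def _clean_cell_text(text: str) -> str:
--     """Prepare raw cell content as a PO msgid.
--
--     Steps:
--     * Strip backtick code fences (````` ``` … ``` `````) — those lines are code.
--     * Strip each line's leading/trailing whitespace (cell indentation is
--       formatting, not significant).
--     * Within each paragraph, join soft-wrapped lines with a single space so
--       that the msgid reads as one continuous sentence.
--     * Preserve blank lines between distinct paragraphs within the cell
--       (represented as ``\\n\\n`` in the msgid).
--     """
--     lines = text.split("\n")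
--     paragraphs: list[str] = []
--     current_para: list[str] = []
--     in_fence = False
--     for line in lines:
--         stripped = line.strip()
--         if stripped == "```":
--             in_fence = not in_fence
--             continue
--         if in_fence:
--             continue
--         if stripped:
--             current_para.append(stripped)
--         else:
--             if current_para:
--                 paragraphs.append(" ".join(current_para))
--                 current_para = []
--     if current_para:
--         paragraphs.append(" ".join(current_para))
--     return "\n\n".join(p for p in paragraphs if p)
-- ===== SOURCE B (Python) =====
-- def _split_on(items, delim):
--     """Split a list into segments at each occurrence of delim (delims removed)."""
--     segs, cur = [], []
--     for x in items:
--         if x == delim: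
--             segs.append(cur)
--             cur = []
--         else:
--             cur.append(x)
--     segs.append(cur)
--     return segs
--
--
-- def _clean_cell_text(text: str) -> str:
--     stripped = [line.strip() for line in text.split("\n")]
--     # Segments between fence markers: even-indexed ones are outside fences.
--     segments = _split_on(stripped, "```")
--     kept = [ln for i, seg in enumerate(segments) if i % 2 == 0 for ln in seg]
--     # Segments between blank lines are the paragraphs.
--     paragraphs = _split_on(kept, "")
--     return "\n\n".join(" ".join(p) for p in paragraphs if p)
-- ===== Notes on version B (the rewrite author's own statement) =====
-- stated objective: alternative
-- what changed: Replaces A's single loop threading an in_fence flag and a current-paragraph accumulator with a generic split-on-delimiter helper applied twice: split the stripped lines at ``` markers and keep the even-indexed segments (outside fences), then split the kept lines at blank lines and join each non-empty segment as a paragraph.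
import Mathlib
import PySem

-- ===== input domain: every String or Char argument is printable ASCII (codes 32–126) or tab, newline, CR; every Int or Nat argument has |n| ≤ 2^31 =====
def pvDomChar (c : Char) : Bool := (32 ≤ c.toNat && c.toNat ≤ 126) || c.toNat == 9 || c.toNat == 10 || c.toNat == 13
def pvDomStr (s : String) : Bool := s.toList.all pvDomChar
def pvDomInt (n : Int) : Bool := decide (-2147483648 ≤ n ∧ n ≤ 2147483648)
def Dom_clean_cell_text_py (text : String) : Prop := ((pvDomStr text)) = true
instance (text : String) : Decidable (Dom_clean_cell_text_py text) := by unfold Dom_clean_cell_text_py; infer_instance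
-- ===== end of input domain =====

-- B replaces A's single in_fence/current_para accumulator loop by a generic
-- split-on-delimiter helper applied twice: split the stripped lines at fence
-- markers keeping even-indexed segments, then split the kept lines at blanks
-- into paragraph segments; objective: alternative decomposition, same cost.

-- ===== PORT A =====
-- the for-loop's state: (paragraphs, current_para), threaded with the in_fence flag
def pvALoop : List String → List String → List String → Bool → List String × List String
  | [], paras, cur, _ => (paras, cur)
  | l :: ls, paras, cur, f =>
    let s := PySem.Str.strip l
    if s = "```" then pvALoop ls paras cur (!f)
    else if f then pvALoop ls paras cur f
    else if s ≠ "" then pvALoop ls paras (cur ++ [s]) f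
    else if cur ≠ [] then pvALoop ls (paras ++ [PySem.Str.join " " cur]) [] f
    else pvALoop ls paras cur f

def clean_cell_text_py (text : String) : String :=
  let lines := (PySem.Str.split? text "\n").getD []
  let r := pvALoop lines [] [] false
  let paras := if r.2 ≠ [] then r.1 ++ [PySem.Str.join " " r.2] else r.1
  PySem.Str.join "\n\n" (paras.filter (· ≠ ""))

-- ===== PORT B =====
-- Source B's _split_on: a loop keeping (segs, cur), flushing cur at each delimiter
def pvSplitOn (items : List String) (delim : String) : List (List String) :=
  let r := items.foldl
    (fun (st : List (List String) × List String) x =>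
      if x = delim then (st.1 ++ [st.2], []) else (st.1, st.2 ++ [x]))
    ([], [])
  r.1 ++ [r.2]

def clean_cell_text_py_alt (text : String) : String :=
  let stripped := ((PySem.Str.split? text "\n").getD []).map PySem.Str.strip
  let segments := pvSplitOn stripped "```"
  let kept := ((PySem.List.enumerate segments 0).filter
      (fun p => PySem.Int.mod p.1 2 == 0)).flatMap (·.2)
  let paragraphs := pvSplitOn kept ""
  PySem.Str.join "\n\n" ((paragraphs.filter (· ≠ [])).map (PySem.Str.join " "))

-- ===== PRECONDITION & SPEC =====
def Spec_clean_cell_text_py (text : String) (out : String) : Prop := out = clean_cell_text_py_alt text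
instance (text : String) (out : String) : Decidable (Spec_clean_cell_text_py text out) := by unfold Spec_clean_cell_text_py; infer_instance

-- ===== CLAIM (what is proved, stated in full; the proofs are below) =====
def Claim_equal_clean_cell_text_py : Prop := ∀ (text : String), Dom_clean_cell_text_py text → Spec_clean_cell_text_py text (clean_cell_text_py text)

-- ===== LEMMAS AND PROOFS =====

-- recursive characterisation of _split_on
def pvSplitR : List String → String → List (List String)
  | [], _ => [[]]
  | x :: xs, d =>
    if x = d then [] :: pvSplitR xs d
    else
      match pvSplitR xs d with
      | h :: t => (x :: h) :: t
      | [] => [[x]]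

theorem pvSplitR_ne_nil (l : List String) (d : String) : pvSplitR l d ≠ [] := by
  cases l with
  | nil => simp [pvSplitR]
  | cons x xs =>
    simp only [pvSplitR]
    split_ifs
    · simp
    · rcases h : pvSplitR xs d with _ | ⟨h', t⟩ <;> simp

-- prepend cur to the head segment
def pvConsHead (cur : List String) : List (List String) → List (List String)
  | [] => [cur]
  | h :: t => (cur ++ h) :: t

theorem pvConsHead_nil (l : List (List String)) (hl : l ≠ []) :
    pvConsHead [] l = l := by
  cases l with
  | nil => exact absurd rfl hl
  | cons h t => simp [pvConsHead]

theorem pvSplitOn_fold_eq (d : String) (xs : List String) :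
    ∀ (segs : List (List String)) (cur : List String),
      ((xs.foldl (fun (st : List (List String) × List String) x =>
          if x = d then (st.1 ++ [st.2], []) else (st.1, st.2 ++ [x])) (segs, cur)).1)
        ++ [((xs.foldl (fun (st : List (List String) × List String) x =>
          if x = d then (st.1 ++ [st.2], []) else (st.1, st.2 ++ [x])) (segs, cur)).2)]
      = segs ++ pvConsHead cur (pvSplitR xs d) := by
  induction xs with
  | nil => intro segs cur; simp [pvSplitR, pvConsHead]
  | cons x xs ih =>
    intro segs cur
    rw [List.foldl_cons]
    show ((xs.foldl _ (if x = d then (segs ++ [cur], []) else (segs, cur ++ [x]))).1) ++ _ = _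
    by_cases h : x = d
    · rw [if_pos h, ih, pvConsHead_nil _ (pvSplitR_ne_nil xs d)]
      simp only [pvSplitR, if_pos h]
      rcases hs : pvSplitR xs d with _ | ⟨h', t⟩
      · exact absurd hs (pvSplitR_ne_nil xs d)
      · simp [pvConsHead]
    · rw [if_neg h, ih]
      simp only [pvSplitR, if_neg h]
      rcases hs : pvSplitR xs d with _ | ⟨h', t⟩
      · exact absurd hs (pvSplitR_ne_nil xs d)
      · simp [pvConsHead]

theorem pvSplitOn_eq (items : List String) (d : String) :
    pvSplitOn items d = pvSplitR items d := by
  have h := pvSplitOn_fold_eq d items [] []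
  simp only [List.nil_append] at h
  rw [pvSplitOn, h, pvConsHead_nil _ (pvSplitR_ne_nil items d)]

-- even-indexed segments, flattened
def pvFlatEven : List (List String) → List String
  | [] => []
  | [a] => a
  | a :: _ :: r => a ++ pvFlatEven r

theorem pvFlatEven_cons (a : List String) (r : List (List String)) :
    pvFlatEven (a :: r) = a ++ pvFlatEven (r.drop 1) := by
  rcases r with _ | ⟨b, r⟩ <;> simp [pvFlatEven]

theorem pvEnum_evens (segs : List (List String)) : ∀ (n : Int),
    ((PySem.List.enumerate segs n).filter
        (fun p => PySem.Int.mod p.1 2 == 0)).flatMap (·.2)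
      = if PySem.Int.mod n 2 == 0 then pvFlatEven segs
        else pvFlatEven (segs.drop 1) := by
  induction segs with
  | nil => intro n; simp [PySem.List.enumerate, pvFlatEven]
  | cons a segs ih =>
    intro n
    have hm : ∀ m : Int, PySem.Int.mod m 2 = m % 2 :=
      fun m => PySem.Int.mod_eq_emod_of_pos (by omega)
    rw [PySem.List.enumerate_cons, List.filter_cons]
    have hg := ih (n + 1)
    by_cases h : n % 2 = 0
    · have hc : (PySem.Int.mod n 2 == 0) = true := by rw [hm n]; simp [h]
      have hc1 : (PySem.Int.mod (n + 1) 2 == 0) = false := by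
        rw [hm (n + 1)]; simp only [beq_eq_false_iff_ne, ne_eq]; omega
      rw [hc1] at hg
      rw [if_neg (by simp)] at hg
      simp only [hc]
      rw [if_pos (by trivial), if_pos (by trivial), List.flatMap_cons, hg, pvFlatEven_cons]
    · have hc : (PySem.Int.mod n 2 == 0) = false := by
        rw [hm n]; simp only [beq_eq_false_iff_ne, ne_eq]; exact h
      have hc1 : (PySem.Int.mod (n + 1) 2 == 0) = true := by
        rw [hm (n + 1)]; simp only [beq_iff_eq]; omega
      rw [hc1] at hg
      rw [if_pos rfl] at hg
      simp only [hc]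
      rw [if_neg (by simp), if_neg (by simp)]
      simp only [List.drop_succ_cons, List.drop_zero]
      exact hg

-- A's in_fence filter, as a proof-side intermediate
def pvFenceFilter : List String → Bool → List String
  | [], _ => []
  | l :: ls, f =>
    let s := PySem.Str.strip l
    if s = "```" then pvFenceFilter ls (!f)
    else if f then pvFenceFilter ls f
    else s :: pvFenceFilter ls f

theorem pvFence_eq_evens (ls : List String) :
    pvFenceFilter ls false = pvFlatEven (pvSplitR (ls.map PySem.Str.strip) "```")
    ∧ pvFenceFilter ls true
        = pvFlatEven ((pvSplitR (ls.map PySem.Str.strip) "```").drop 1) := by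
  induction ls with
  | nil => simp [pvFenceFilter, pvSplitR, pvFlatEven]
  | cons l ls ih =>
    obtain ⟨ihf, iht⟩ := ih
    simp only [pvFenceFilter, List.map_cons, pvSplitR]
    by_cases h : PySem.Str.strip l = "```"
    · simp [h, ihf, iht, pvFlatEven_cons]
    · rcases hs : pvSplitR (ls.map PySem.Str.strip) "```" with _ | ⟨h', t⟩
      · exact absurd hs (pvSplitR_ne_nil _ _)
      · rw [hs] at ihf iht
        constructor <;> simp [h, ihf, iht, pvFlatEven_cons]

-- A's paragraph list, without the flushed-paragraphs accumulator (finalisation built in)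
def pvAParas : List String → List String → Bool → List String
  | [], cur, _ => if cur ≠ [] then [PySem.Str.join " " cur] else []
  | l :: ls, cur, f =>
    let s := PySem.Str.strip l
    if s = "```" then pvAParas ls cur (!f)
    else if f then pvAParas ls cur f
    else if s ≠ "" then pvAParas ls (cur ++ [s]) f
    else if cur ≠ [] then PySem.Str.join " " cur :: pvAParas ls [] f
    else pvAParas ls cur f

def pvFinalize (r : List String × List String) : List String :=
  if r.2 ≠ [] then r.1 ++ [PySem.Str.join " " r.2] else r.1

theorem pvALoop_eq (ls : List String) : ∀ (paras cur : List String) (f : Bool),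
    pvFinalize (pvALoop ls paras cur f) = paras ++ pvAParas ls cur f := by
  induction ls with
  | nil =>
    intro paras cur f
    simp only [pvALoop, pvAParas, pvFinalize]
    split_ifs <;> simp_all
  | cons l ls ih =>
    intro paras cur f
    simp only [pvALoop, pvAParas]
    split_ifs with h1 h2 h3 h4
    · exact ih ..
    · exact ih ..
    · exact ih ..
    · rw [ih]; simp
    · exact ih ..

theorem pvSplitR_all_nonblank (cur : List String) (hx : ∀ x ∈ cur, x ≠ "") :
    pvSplitR cur "" = [cur] := by
  induction cur with
  | nil => rfl
  | cons x xs ih =>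
    rw [pvSplitR, if_neg (hx x (by simp)), ih (fun z hz => hx z (by simp [hz]))]

theorem pvSplitR_append_blank (cur : List String) (rest : List String)
    (hx : ∀ x ∈ cur, x ≠ "") :
    pvSplitR (cur ++ "" :: rest) "" = cur :: pvSplitR rest "" := by
  induction cur with
  | nil => simp [pvSplitR]
  | cons x xs ih =>
    rw [List.cons_append, pvSplitR, if_neg (hx x (by simp)),
      ih (fun z hz => hx z (by simp [hz]))]

-- B's paragraph stage as a function of the kept lines
def pvParaPost (kept : List String) : List String :=
  ((pvSplitR kept "").filter (· ≠ [])).map (PySem.Str.join " ")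

theorem pvParaPost_blank_cons (rest : List String) :
    pvParaPost ("" :: rest) = pvParaPost rest := by
  unfold pvParaPost
  rw [pvSplitR, if_pos rfl, List.filter_cons]
  simp

theorem pvAParas_eq_post (ls : List String) : ∀ (cur : List String) (f : Bool),
    (∀ x ∈ cur, x ≠ "") →
    pvAParas ls cur f = pvParaPost (cur ++ pvFenceFilter ls f) := by
  induction ls with
  | nil =>
    intro cur f hx
    simp only [pvAParas, pvFenceFilter, List.append_nil]
    rcases cur with _ | ⟨x, xs⟩
    · simp [pvParaPost, pvSplitR]
    · rw [if_pos (by simp)]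
      simp [pvParaPost, pvSplitR_all_nonblank (x :: xs) hx]
  | cons l ls ih =>
    intro cur f hx
    simp only [pvAParas, pvFenceFilter]
    split_ifs with h1 h2 h3 h4
    · exact ih cur (!f) hx
    · exact ih cur f hx
    · rw [ih (cur ++ [PySem.Str.strip l]) f
        (by intro z hz
            rcases List.mem_append.mp hz with h | h
            · exact hx z h
            · simp at h; simpa [h])]
      simp
    · rw [ih [] f (by simp), List.nil_append]
      rw [show PySem.Str.strip l = "" from by simpa using h3]
      unfold pvParaPost
      rw [pvSplitR_append_blank cur _ hx, List.filter_cons, if_pos (by simpa using h4)]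
      rw [List.map_cons]
    · rw [show PySem.Str.strip l = "" from by simpa using h3]
      rw [show cur = ([] : List String) from by simpa using h4]
      rw [ih [] f (by simp), List.nil_append, List.nil_append, pvParaPost_blank_cons]

theorem pvSplitR_segs_nonblank (l : List String) :
    ∀ seg ∈ pvSplitR l "", ∀ x ∈ seg, x ≠ "" := by
  induction l with
  | nil => simp [pvSplitR]
  | cons y ys ih =>
    simp only [pvSplitR]
    split_ifs with h
    · intro seg hseg
      rcases List.mem_cons.mp hseg with rfl | hs
      · simp
      · exact ih seg hs
    · rcases hs : pvSplitR ys "" with _ | ⟨h', t⟩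
      · exact absurd hs (pvSplitR_ne_nil _ _)
      · intro seg hseg
        rcases List.mem_cons.mp hseg with rfl | hm
        · intro x hx
          rcases List.mem_cons.mp hx with rfl | hx
          · exact h
          · exact ih h' (hs ▸ List.mem_cons_self) x hx
        · exact ih seg (hs ▸ List.mem_cons_of_mem _ hm)

theorem pvToList_eq_nil (x : String) (h : x.toList = []) : x = "" :=
  String.toList_eq_nil_iff.mp h

theorem pvJoin_space_ne_empty (x : String) (xs : List String) (hx : x ≠ "") :
    PySem.Str.join " " (x :: xs) ≠ "" := by
  intro hcon
  have hto : (PySem.Str.join " " (x :: xs)).toList = [] := by rw [hcon]; rfl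
  rw [PySem.Str.toList_join] at hto
  have hxl : x.toList ≠ [] := fun hnil => hx (pvToList_eq_nil x hnil)
  rcases xs with _ | ⟨y, ys⟩
  · rw [List.map_cons, List.map_nil, PySem.Chars.join_singleton] at hto
    exact hxl hto
  · rw [List.map_cons, List.map_cons, PySem.Chars.join_cons_cons] at hto
    simp at hto

theorem pvParaPost_filter (kept : List String) :
    (pvParaPost kept).filter (· ≠ "") = pvParaPost kept := by
  rw [List.filter_eq_self]
  intro p hp
  simp only [pvParaPost, List.mem_map, List.mem_filter] at hp
  obtain ⟨g, ⟨hmem, hne⟩, rfl⟩ := hp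
  rcases g with _ | ⟨x, xs⟩
  · simp at hne
  · simp only [decide_eq_true_eq]
    exact pvJoin_space_ne_empty x xs (pvSplitR_segs_nonblank kept _ hmem x (by simp))

-- ===== VERDICT (by name: the statement is the Claim_ definition above) =====
theorem clean_cell_text_py_spec : Claim_equal_clean_cell_text_py := by
  intro text _
  unfold Spec_clean_cell_text_py clean_cell_text_py clean_cell_text_py_alt
  dsimp only
  have h1 := pvALoop_eq ((PySem.Str.split? text "\n").getD []) [] [] false
  simp only [List.nil_append, pvFinalize] at h1
  rw [h1, pvAParas_eq_post _ [] false (by simp), List.nil_append]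
  rw [pvSplitOn_eq, pvSplitOn_eq, pvEnum_evens]
  rw [if_pos (by decide)]
  rw [← (pvFence_eq_evens ((PySem.Str.split? text "\n").getD [])).1]
  have h2 := pvParaPost_filter (pvFenceFilter ((PySem.Str.split? text "\n").getD []) false)
  simp only [pvParaPost] at h2 ⊢
  rw [h2]
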